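-- pv_equiv track=rewrite | github.com/joshanashakya/dissertation | workspace/dataset/java-python/GeeksForGeeks/3984/A/2.py | checkconv
-- ===== SOURCE A (Python) =====
-- def checkconv(a, b, n) :
--
--     c = [0]*n; flag = 0;
--
--     # Create a temporary array c[]
--     # which contains the difference
--     # of the array elements
--     for i in range(n) :
--         c[i] = b[i] - a[i];
--
--     # Create a vector pair for all non zero
--     # elements of array c[n] with there index
--     idxs = [];
--     for i in range(n) :
--         if (c[i] != 0) :
--             idxs.append((i, c[i]));
--
--     # Check If the index value differs by 1
--     # and the difference value is same
--     for i in range(len(idxs) - 1) :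
--         if (idxs[i + 1][0] - idxs[i][0] != 1
--             or idxs[i + 1][1] != idxs[i][1]) :
--             flag = 1;
--             break;
--
--     return not flag;
-- ===== SOURCE B (Python) =====
-- def checkconv(a, b, n):
--     # three-phase scan: skip leading zeros of d = b - a, skip the constant
--     # non-zero run, then the remainder must be all zeros
--     d = [b[i] - a[i] for i in range(n)]
--     i = 0
--     while i < len(d) and d[i] == 0:
--         i += 1
--     if i == len(d):
--         return True
--     v = d[i]
--     while i < len(d) and d[i] == v:
--         i += 1
--     return all(x == 0 for x in d[i:])
-- ===== Notes on version B (the rewrite author's own statement) =====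
-- stated objective: simpler
-- what changed: A builds a list of (index,value) pairs for all non-zero differences and then checks every adjacent pair for index-gap 1 and equal values; B never materialises that pair list: it does a single three-phase scan over the differences (skip leading zeros, skip the constant non-zero run, require the rest to be zero), with early exit.
import Mathlib
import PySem

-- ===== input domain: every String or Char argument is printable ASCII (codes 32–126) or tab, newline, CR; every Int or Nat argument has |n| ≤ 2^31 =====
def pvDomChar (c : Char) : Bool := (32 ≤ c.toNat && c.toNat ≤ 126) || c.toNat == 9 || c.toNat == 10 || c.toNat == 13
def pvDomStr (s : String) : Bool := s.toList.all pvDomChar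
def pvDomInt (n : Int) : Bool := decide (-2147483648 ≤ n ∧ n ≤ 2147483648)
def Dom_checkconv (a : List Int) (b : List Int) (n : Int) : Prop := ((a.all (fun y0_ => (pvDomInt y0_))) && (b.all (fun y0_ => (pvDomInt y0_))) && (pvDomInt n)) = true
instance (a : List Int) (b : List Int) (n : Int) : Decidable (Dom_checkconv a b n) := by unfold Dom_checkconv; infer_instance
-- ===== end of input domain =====

-- B replaces A's build-non-zero-pair-list + adjacent-pair check by a single
-- three-phase scan of the differences (skip zeros, skip the constant non-zero
-- run, require the rest zero): simpler, no intermediate pair list.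


-- ===== PORT A =====
-- A's third loop: walk adjacent pairs of idxs, set flag = 1 and break at the
-- first pair whose indices do not differ by 1 or whose values differ
def pvAdjChk : List (Int × Int) → Bool
  | (i, v) :: (j, w) :: rest =>
      if j - i ≠ 1 ∨ w ≠ v then true else pvAdjChk ((j, w) :: rest)
  | _ => false

def checkconv (a : List Int) (b : List Int) (n : Int) : Bool :=
  -- c[i] = b[i] - a[i]  (indices are in range under Pre_, so getD's default is never used)
  let c := (PySem.List.pyRange 0 n).map
      (fun i => PySem.List.pyGetD b i 0 - PySem.List.pyGetD a i 0)
  -- idxs: (index, value) of every non-zero entry of c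
  let idxs := (PySem.List.pyRange 0 n).foldl
      (fun acc i => if PySem.List.pyGetD c i 0 ≠ 0
                    then acc ++ [(i, PySem.List.pyGetD c i 0)] else acc) []
  let flag : Int := if pvAdjChk idxs then 1 else 0
  flag == 0

-- ===== PORT B =====
-- 'while i < len(d) and d[i] == 0: i += 1' — returns the suffix d[i:]
def pvSkipZeros : List Int → List Int
  | [] => []
  | x :: xs => if x = 0 then pvSkipZeros xs else x :: xs

-- 'while i < len(d) and d[i] == v: i += 1' — returns the suffix d[i:]
def pvSkipVal (v : Int) : List Int → List Int
  | [] => []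
  | x :: xs => if x = v then pvSkipVal v xs else x :: xs

def checkconv_alt (a : List Int) (b : List Int) (n : Int) : Bool :=
  let d := (PySem.List.pyRange 0 n).map
      (fun i => PySem.List.pyGetD b i 0 - PySem.List.pyGetD a i 0)
  let t := pvSkipZeros d            -- phase 1: skip leading zeros
  match t with
  | [] => true                      -- i == len(d): return True
  | v :: _ => (pvSkipVal v t).all (fun x => x == 0)  -- v = d[i]; phases 2 and 3

-- ===== PRECONDITION & SPEC =====
-- A raises IndexError iff some index 0 ≤ i < n reaches past a or b; nothing
-- else raises (for n ≤ 0 every loop is empty and A returns True), so Pre_ is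
-- exactly n ≤ len(a) ∧ n ≤ len(b).
def Pre_checkconv (a : List Int) (b : List Int) (n : Int) : Prop :=
  n ≤ (a.length : Int) ∧ n ≤ (b.length : Int)
instance (a : List Int) (b : List Int) (n : Int) : Decidable (Pre_checkconv a b n) := by
  unfold Pre_checkconv; infer_instance

def pvWitness_checkconv : List Int × List Int × Int := ([1, 2, 5], [2, 3, 5], 3)

def Spec_checkconv (a : List Int) (b : List Int) (n : Int) (out : Bool) : Prop := out = checkconv_alt a b n
instance (a : List Int) (b : List Int) (n : Int) (out : Bool) : Decidable (Spec_checkconv a b n out) := by unfold Spec_checkconv; infer_instance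

-- ===== CLAIM (what is proved, stated in full; the proofs are below) =====
def Claim_equal_checkconv : Prop := ∀ (a : List Int) (b : List Int) (n : Int), Dom_checkconv a b n → Pre_checkconv a b n → Spec_checkconv a b n (checkconv a b n)

-- ===== LEMMAS AND PROOFS =====

-- A's idxs loop as filter+map (what PySem.List.foldl_append_ite yields)
def pvNz (g : Int → Int) (l : List Int) : List (Int × Int) :=
  (l.filter (fun i => decide (g i ≠ 0))).map (fun i => (i, g i))

-- B's tail computation on the difference list
def pvPhase (d : List Int) : Bool :=
  match pvSkipZeros d with
  | [] => true
  | v :: _ => (pvSkipVal v (pvSkipZeros d)).all (fun x => x == 0)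

theorem pvRange_zero (k : Int) : PySem.List.pyRange k (k + (0:Nat)) = [] := by
  simp [PySem.List.pyRange]

theorem pvRange_succ (k : Int) (m : Nat) :
    PySem.List.pyRange k (k + (↑(m+1):Int)) = k :: PySem.List.pyRange (k+1) ((k+1) + ↑m) := by
  rw [PySem.List.pyRange_one_cons (by omega)]; norm_num; ring_nf

theorem pvNz_cons_of_ne (g : Int → Int) (k : Int) (l : List Int) (h : g k ≠ 0) :
    pvNz g (k :: l) = (k, g k) :: pvNz g l := by
  simp [pvNz, h]

theorem pvNz_cons_of_eq (g : Int → Int) (k : Int) (l : List Int) (h : g k = 0) :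
    pvNz g (k :: l) = pvNz g l := by
  simp [pvNz, h]

theorem pvNz_nil_iff (g : Int → Int) (l : List Int) :
    pvNz g l = [] ↔ (l.map g).all (fun x => x == 0) = true := by
  simp [pvNz, List.filter_eq_nil_iff]

theorem pvNz_mem_lb (g : Int → Int) (l : List Int) (lo : Int)
    (h : ∀ i ∈ l, lo ≤ i) {j w : Int} {T : List (Int × Int)}
    (he : pvNz g l = (j, w) :: T) : lo ≤ j := by
  have hm : (j, w) ∈ pvNz g l := by rw [he]; exact List.mem_cons_self
  simp only [pvNz, List.mem_map] at hm
  obtain ⟨i, hi, hiw⟩ := hm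
  have := h i (List.mem_of_mem_filter hi)
  cases hiw; exact this

theorem pvAdjChk_single (p : Int × Int) : pvAdjChk [p] = false := by cases p; rfl

theorem pvAdjChk_cons2 (i v j w : Int) (rest : List (Int × Int)) :
    pvAdjChk ((i, v) :: (j, w) :: rest)
      = if j - i ≠ 1 ∨ w ≠ v then true else pvAdjChk ((j, w) :: rest) := rfl

theorem pvSkipVal_cons (v x : Int) (xs : List Int) :
    pvSkipVal v (x :: xs) = if x = v then pvSkipVal v xs else x :: xs := rfl

theorem pvSkipZeros_cons (x : Int) (xs : List Int) :
    pvSkipZeros (x :: xs) = if x = 0 then pvSkipZeros xs else x :: xs := rfl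

theorem pvPhase_cons_zero (l : List Int) : pvPhase ((0:Int) :: l) = pvPhase l := by
  unfold pvPhase; rw [pvSkipZeros_cons, if_pos rfl]

theorem pvPhase_cons_nonzero (x : Int) (l : List Int) (hx : x ≠ 0) :
    pvPhase (x :: l) = (pvSkipVal x l).all (fun y => y == 0) := by
  unfold pvPhase
  rw [pvSkipZeros_cons, if_neg hx]
  show (pvSkipVal x (x :: l)).all (fun y => y == 0) = _
  rw [pvSkipVal_cons, if_pos rfl]

-- core, previous non-zero entry at index k - 1 with value v: A's remaining
-- adjacency check succeeds iff B's skip-the-run-then-all-zero test does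
theorem pvKL2 (m : Nat) : ∀ (k : Int) (g : Int → Int) (v : Int), v ≠ 0 →
    (!pvAdjChk ((k - 1, v) :: pvNz g (PySem.List.pyRange k (k + m))))
      = (pvSkipVal v ((PySem.List.pyRange k (k + m)).map g)).all (fun x => x == 0) := by
  induction m with
  | zero =>
      intro k g v hv
      rw [pvRange_zero]
      simp [pvNz, pvAdjChk, pvSkipVal]
  | succ m ih =>
      intro k g v hv
      rw [pvRange_succ]
      by_cases hk : g k = v
      · -- same value continues the run
        rw [List.map_cons, pvNz_cons_of_ne g k _ (hk ▸ hv)]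
        have h1 : pvAdjChk ((k - 1, v) :: (k, g k) :: pvNz g (PySem.List.pyRange (k+1) (k+1+(m:Int))))
            = pvAdjChk ((k, g k) :: pvNz g (PySem.List.pyRange (k+1) (k+1+(m:Int)))) := by
          rw [pvAdjChk_cons2]; simp [hk]
        rw [h1]
        rw [pvSkipVal_cons, if_pos hk, hk]
        have := ih (k+1) g v hv
        rw [show k + 1 - 1 = k by ring] at this
        exact this
      · by_cases hz : g k = 0
        · -- zero difference ends the run: remaining non-zeros must be empty
          rw [List.map_cons, pvNz_cons_of_eq g k _ hz, hz]
          rw [pvSkipVal_cons, if_neg (fun h => hv h.symm)]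
          rcases he : pvNz g (PySem.List.pyRange (k+1) (k+1+(m:Int))) with _ | ⟨⟨j, w⟩, T⟩
          · rw [pvAdjChk_single]
            have hall := (pvNz_nil_iff g _).mp he
            simp [hall]
          · have hj : k + 1 ≤ j :=
              pvNz_mem_lb g _ (k+1) (fun i hi => (PySem.List.mem_pyRange_one.mp hi).1) he
            rw [pvAdjChk_cons2, if_pos (Or.inl (by omega))]
            have hne : ((PySem.List.pyRange (k+1) (k+1+(m:Int))).map g).all (fun x => x == 0) = false := by
              apply Bool.eq_false_iff.mpr
              intro hall
              have := (pvNz_nil_iff g _).mpr hall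
              rw [he] at this; exact absurd this (by simp)
            simp [hne]
        · -- different non-zero value: both sides false
          rw [List.map_cons, pvNz_cons_of_ne g k _ hz, pvAdjChk_cons2, if_pos (Or.inr hk)]
          rw [pvSkipVal_cons, if_neg hk]
          simp [hz]

theorem pvKL (m : Nat) : ∀ (k : Int) (g : Int → Int),
    (!pvAdjChk (pvNz g (PySem.List.pyRange k (k + (m:Int)))))
      = pvPhase ((PySem.List.pyRange k (k + (m:Int))).map g) := by
  induction m with
  | zero =>
      intro k g
      rw [pvRange_zero]
      simp [pvNz, pvAdjChk, pvPhase, pvSkipZeros]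
  | succ m ih =>
      intro k g
      rw [pvRange_succ, List.map_cons]
      by_cases hz : g k = 0
      · rw [pvNz_cons_of_eq g k _ hz, hz, pvPhase_cons_zero]
        exact ih (k+1) g
      · rw [pvNz_cons_of_ne g k _ hz, pvPhase_cons_nonzero _ _ hz]
        have := pvKL2 m (k+1) g (g k) hz
        rw [show k + 1 - 1 = k by ring] at this
        exact this

theorem pvGetD_mapRange (g : Int → Int) (n i : Int) (hi : i ∈ PySem.List.pyRange 0 n) :
    PySem.List.pyGetD ((PySem.List.pyRange 0 n).map g) i 0 = g i := by
  have h := PySem.List.mem_pyRange_one.mp hi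
  have hn : n = ((n.toNat : Int)) := by omega
  have hik : i = ((i.toNat : Int)) := by omega
  rw [hn, hik]
  exact PySem.List.pyGetD_map_pyRange g n.toNat i.toNat 0 (by omega)

theorem pvNz_congr (f g : Int → Int) (l : List Int) (h : ∀ i ∈ l, f i = g i) :
    pvNz f l = pvNz g l := by
  unfold pvNz
  rw [List.filter_congr (fun i hi => by rw [h i hi])]
  apply List.map_congr_left
  intro i hi
  rw [h i (List.mem_of_mem_filter hi)]

-- ===== VERDICT (by name: the statement is the Claim_ definition above) =====
theorem checkconv_spec : Claim_equal_checkconv := by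
  intro a b n _ _
  unfold Spec_checkconv checkconv checkconv_alt
  simp only [PySem.List.foldl_append_ite, List.nil_append]
  rw [show ((PySem.List.pyRange 0 n |>.filter
        (fun i => decide (PySem.List.pyGetD ((PySem.List.pyRange 0 n).map
          (fun i => PySem.List.pyGetD b i 0 - PySem.List.pyGetD a i 0)) i 0 ≠ 0))).map
        (fun i => (i, PySem.List.pyGetD ((PySem.List.pyRange 0 n).map
          (fun i => PySem.List.pyGetD b i 0 - PySem.List.pyGetD a i 0)) i 0)))
      = pvNz (fun i => PySem.List.pyGetD b i 0 - PySem.List.pyGetD a i 0) (PySem.List.pyRange 0 n)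
    by exact pvNz_congr _ _ _ (fun i hi => pvGetD_mapRange _ n i hi)]
  have hflag : ∀ (X : List (Int × Int)),
      ((if pvAdjChk X then (1:Int) else 0) == 0) = !pvAdjChk X := by
    intro X; by_cases h : pvAdjChk X = true <;> simp [h]
  rw [hflag]
  show _ = pvPhase ((PySem.List.pyRange 0 n).map (fun i => PySem.List.pyGetD b i 0 - PySem.List.pyGetD a i 0))
  rw [show PySem.List.pyRange 0 n = PySem.List.pyRange 0 ((0:Int) + ((n.toNat : Int))) by
    by_cases hn : n ≤ 0
    · rw [show ((0:Int) + ((n.toNat : Int))) = 0 by omega]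
      simp [PySem.List.pyRange]; omega
    · rw [show ((0:Int) + ((n.toNat : Int))) = n by omega]]
  exact pvKL n.toNat 0 _
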